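-- pv_equiv track=rewrite | github.com/ankurbhambri/DS-Algo | sliding-window/fixed-size/longest-substing-at-least-k-distinct-unique-characters.py | at_least_k_unique
-- ===== SOURCE A (Python) =====
-- def at_least_k_unique(s, k):
--
--     n = len(s)
--     if k == 0:
--         # all substrings are valid
--         return n * (n + 1) // 2
--
--     count = 0
--     l = 0
--     char_freq = {}
--
--     for r in range(n):
--
--         # r char add karo
--         char_freq[s[r]] = char_freq.get(s[r], 0) + 1
--
--         # at least k unique chars
--         while len(char_freq) >= k:
--
--             # Current position se sab valid substrings count
--             count += n - r
--
--             # l char remove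
--             char_freq[s[l]] -= 1
--             if char_freq[s[l]] == 0:
--                 del char_freq[s[l]]
--
--             l += 1
--
--     return count
-- ===== SOURCE B (Python) =====
-- def at_least_k_unique(s, k):
--     n = len(s)
--     total = n * (n + 1) // 2
--     if k <= 0:
--         # every substring trivially has at least k distinct characters
--         return total
--     # complement: subtract the substrings with at most k-1 distinct characters
--     m = k - 1
--     at_most = 0
--     l = 0
--     distinct = 0
--     freq = {}
--     for r, c in enumerate(s):
--         f = freq.get(c, 0)
--         if f == 0:
--             distinct += 1
--         freq[c] = f + 1
--         while distinct > m:
--             d = s[l]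
--             g = freq[d] - 1
--             freq[d] = g
--             if g == 0:
--                 distinct -= 1
--             l += 1
--         at_most += r - l + 1
--     return total - at_most
-- ===== Notes on version B (the rewrite author's own statement) =====
-- stated objective: alternative
-- what changed: B counts the complement (total substrings n*(n+1)//2 minus those with at most k-1 distinct characters) with a window that never deletes dict keys: it keeps zero counts and maintains a separate running 'distinct' counter, iterates with enumerate, and accumulates r-l+1 per index instead of A's inner-loop accumulation of n-r per shrink step.
import Mathlib
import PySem

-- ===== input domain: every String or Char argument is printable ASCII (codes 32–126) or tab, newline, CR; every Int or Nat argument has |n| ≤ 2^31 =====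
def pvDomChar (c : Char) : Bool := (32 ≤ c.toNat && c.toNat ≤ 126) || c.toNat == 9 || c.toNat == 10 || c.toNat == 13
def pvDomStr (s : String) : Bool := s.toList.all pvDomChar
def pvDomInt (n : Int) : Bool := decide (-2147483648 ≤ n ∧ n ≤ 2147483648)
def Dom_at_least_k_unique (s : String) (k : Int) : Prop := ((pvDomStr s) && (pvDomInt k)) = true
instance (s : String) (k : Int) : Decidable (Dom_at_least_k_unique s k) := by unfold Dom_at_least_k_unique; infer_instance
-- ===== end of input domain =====

-- B counts the complement (total substrings minus those with at most k-1 distinct characters),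
-- with a window that keeps zero counts and a separate 'distinct' counter instead of deleting
-- dict keys ("alternative": different counting strategy, same O(n) cost).

-- ===== PORT A =====
-- inner 'while len(char_freq) >= k' loop of A; fuel only makes the recursion structural
-- (n+1 steps always suffice on inputs where the Python loop terminates).  In the branches
-- where Python raises (s[l] out of range → IndexError, missing key → KeyError) the port
-- returns the current state; those states carry no claim (they are excluded by Pre_), which
-- is also why the 'count += n - r' of the loop body is applied only on the non-raising path.
def pvShrinkA (cs : List Char) (n k r : Int) : Nat → Int → Int → PySem.Dict Char Int → Int × Int × PySem.Dict Char Int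
  | 0, count, l, freq => (count, l, freq)
  | fuel+1, count, l, freq =>
    if k ≤ (PySem.Dict.size freq : Int) then
      match PySem.List.pyGet? cs l with
      | none => (count, l, freq)      -- Python: IndexError
      | some c =>
        match PySem.Dict.get? freq c with
        | none => (count, l, freq)    -- Python: KeyError
        | some v =>
          let count' := count + (n - r)
          let v' := v - 1
          let freq' := if v' == 0 then (freq.insert c v').erase c else freq.insert c v'
          pvShrinkA cs n k r fuel count' (l + 1) freq'
    else (count, l, freq)

-- body of A's 'for r in range(n)' loop; state = (count, l, char_freq)
def pvStepA (cs : List Char) (n k : Int) (st : Int × Int × PySem.Dict Char Int) (r : Int) : Int × Int × PySem.Dict Char Int :=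
  match PySem.List.pyGet? cs r with
  | none => st                        -- unreachable: r ∈ range(n)
  | some c =>
      let freq := st.2.2.insert c (st.2.2.getD c 0 + 1)
      pvShrinkA cs n k r (cs.length + 1) st.1 st.2.1 freq

def at_least_k_unique (s : String) (k : Int) : Int :=
  let cs := s.toList
  let n : Int := cs.length
  if k = 0 then PySem.Int.floordiv (n * (n + 1)) 2
  else ((PySem.List.pyRange 0 n).foldl (pvStepA cs n k) (0, 0, PySem.Dict.empty)).1

-- ===== PORT B =====
-- B's loop state as a record: at_most, the left pointer, the running number of distinct
-- characters in the window, and the frequency dict (which keeps zero entries)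
structure PvBSt where
  atMost : Int
  left : Int
  distinct : Int
  freq : PySem.Dict Char Int
deriving Repr, DecidableEq

-- inner 'while distinct > m' loop of B; same fuel convention as A's port.
-- B never removes keys from freq, so Python's freq[d] is exact as getD here: on every
-- reachable state d = s[l] with l ≤ r is a key of freq (every char of s[0..r] was inserted
-- and keys are never deleted); the pyGet? match still models the IndexError of s[l].
def pvShrinkB (cs : List Char) (m : Int) : Nat → PvBSt → PvBSt
  | 0, st => st
  | fuel+1, st =>
    if st.distinct ≤ m then st
    else
      match PySem.List.pyGet? cs st.left with
      | none => st                    -- Python: IndexError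
      | some d =>
        let g := st.freq.getD d 0 - 1
        pvShrinkB cs m fuel
          { st with left := st.left + 1,
                    distinct := if g == 0 then st.distinct - 1 else st.distinct,
                    freq := st.freq.insert d g }

-- B's 'for r, c in enumerate(s)' loop as structural recursion over the enumerated list
def pvGoB (cs : List Char) (m : Int) : List (Int × Char) → PvBSt → Int
  | [], st => st.atMost
  | (r, c) :: rest, st =>
      let f := st.freq.getD c 0
      let st' := pvShrinkB cs m (cs.length + 1)
        { st with distinct := if f == 0 then st.distinct + 1 else st.distinct,
                  freq := st.freq.insert c (f + 1) }
      pvGoB cs m rest { st' with atMost := st.atMost + (r - st'.left + 1) }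

def at_least_k_unique_alt (s : String) (k : Int) : Int :=
  let cs := s.toList
  let n : Int := cs.length
  let total := PySem.Int.floordiv (n * (n + 1)) 2
  if k ≤ 0 then total
  else total - pvGoB cs (k - 1) (PySem.List.enumerate cs) ⟨0, 0, 0, PySem.Dict.empty⟩

-- ===== PRECONDITION & SPEC =====
-- Pre_ excludes exactly the inputs where A raises: for k < 0 and nonempty s, A's shrink
-- loop empties the dict and then hits a KeyError/IndexError.  A returns on everything else.
def Pre_at_least_k_unique (s : String) (k : Int) : Prop := 0 ≤ k ∨ s.toList = []
instance (s : String) (k : Int) : Decidable (Pre_at_least_k_unique s k) := by unfold Pre_at_least_k_unique; infer_instance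

def pvWitness_at_least_k_unique : String × Int := ("abcab", 2)

def Spec_at_least_k_unique (s : String) (k : Int) (out : Int) : Prop := out = at_least_k_unique_alt s k
instance (s : String) (k : Int) (out : Int) : Decidable (Spec_at_least_k_unique s k out) := by unfold Spec_at_least_k_unique; infer_instance

-- ===== CLAIM (what is proved, stated in full; the proofs are below) =====
def Claim_equal_at_least_k_unique : Prop := ∀ (s : String) (k : Int), Dom_at_least_k_unique s k → Pre_at_least_k_unique s k → Spec_at_least_k_unique s k (at_least_k_unique s k)

-- ===== LEMMAS AND PROOFS =====

-- the simulation invariant between A's window dict and B's (freqB keeps zero entries,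
-- 'distinct' mirrors A's dict size, both agree with the multiset of the window w)
def pvInv (w : List Char) (freqA freqB : PySem.Dict Char Int) (distinct : Int) : Prop :=
  (∀ c, freqA.getD c 0 = (w.count c : Int)) ∧
  (∀ c v, freqA.get? c = some v → v ≠ 0) ∧
  freqA.keys.Nodup ∧
  ((freqA.size : Int) = distinct) ∧
  (∀ c, freqB.getD c 0 = (w.count c : Int))

-- Dict.erase facts (erase has no lemmas in the PySem book)
theorem pvGet?_erase_self {ν : Type} (d : PySem.Dict Char ν) (c : Char) :
    (d.erase c).get? c = none := by
  simp [PySem.Dict.erase, PySem.Dict.get?, List.find?_filter, List.find?_eq_none]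

theorem pvGet?_erase_of_ne {ν : Type} (d : PySem.Dict Char ν) {x c : Char} (h : x ≠ c) :
    (d.erase c).get? x = d.get? x := by
  simp only [PySem.Dict.erase, PySem.Dict.get?, List.find?_filter]
  have he : (fun (a : Char × ν) => decide ((!a.1 == c) = true ∧ (a.1 == x) = true)) = fun (a : Char × ν) => a.1 == x := by
    funext a; by_cases hx : a.1 = x <;> simp [hx, h]
  rw [he]

theorem pvNodupKeys_erase {ν : Type} (d : PySem.Dict Char ν) (c : Char)
    (h : d.keys.Nodup) : (d.erase c).keys.Nodup := by
  obtain ⟨l⟩ := d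
  simp only [PySem.Dict.erase, PySem.Dict.keys] at *
  exact List.Nodup.sublist (List.Sublist.map Prod.fst List.filter_sublist) h

theorem pvSize_erase {ν : Type} (d : PySem.Dict Char ν) {c : Char} {v : ν}
    (hv : d.get? c = some v) (hn : d.keys.Nodup) :
    d.size = (d.erase c).size + 1 := by
  obtain ⟨l⟩ := d
  simp only [PySem.Dict.get?, PySem.Dict.keys] at hv hn
  simp only [PySem.Dict.erase, PySem.Dict.size]
  induction l with
  | nil => simp at hv
  | cons p rest ih =>
    simp only [List.map_cons, List.nodup_cons] at hn
    by_cases hpc : p.1 = c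
    · have hnotin : ∀ q ∈ rest, (!q.1 == c) = true := by
        intro q hq
        have : q.1 ≠ p.1 := fun he => hn.1 (he ▸ List.mem_map_of_mem hq)
        simp [hpc ▸ this]
      simp [hpc, List.filter_eq_self.mpr hnotin]
    · simp only [List.find?_cons, show (p.1 == c) = false by simp [hpc]] at hv
      simp only [List.filter_cons, show (!p.1 == c) = true by simp [hpc], if_pos trivial,
        List.length_cons]
      rw [ih hv hn.2]

-- outer-loop insert: both dicts gain one occurrence of ch
theorem pvInsert_inv (w : List Char) (ch : Char) (freqA freqB : PySem.Dict Char Int) (distinct : Int)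
    (hInv : pvInv w freqA freqB distinct) :
    pvInv (w ++ [ch]) (freqA.insert ch (freqA.getD ch 0 + 1)) (freqB.insert ch (freqB.getD ch 0 + 1))
      (if freqB.getD ch 0 == 0 then distinct + 1 else distinct) := by
  obtain ⟨IA, IP, IN, IS, IB⟩ := hInv
  have hcount : ∀ c : Char, ((w ++ [ch]).count c : Int) = (w.count c : Int) + (if c = ch then 1 else 0) := by
    intro c
    by_cases hc : c = ch
    · simp [hc, List.count_append]
    · simp only [List.count_append, List.count_singleton]
      rw [show (ch == c) = false by simp; exact fun h => hc h.symm]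
      simp [hc]
  have hAB : freqA.getD ch 0 = freqB.getD ch 0 := by rw [IA, IB]
  refine ⟨?_, ?_, PySem.Dict.nodup_keys_insert _ _ _ IN, ?_, ?_⟩
  · intro c
    rw [PySem.Dict.getD_insert, hcount c]
    by_cases hc : c = ch
    · rw [if_pos hc, if_pos hc, hc, IA ch]
    · rw [if_neg hc, if_neg hc, IA c, add_zero]
  · intro c v
    rw [PySem.Dict.get?_insert]
    by_cases hc : c = ch
    · rw [if_pos hc]
      intro hv
      have h1 := IA ch
      have h2 : v = freqA.getD ch 0 + 1 := (Option.some.inj hv).symm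
      omega
    · rw [if_neg hc]; exact IP c v
  · rw [PySem.Dict.size_insert]
    by_cases hc : freqA.contains ch = true
    · have : ∃ v, freqA.get? ch = some v := by
        rw [PySem.Dict.contains_eq_isSome_get?] at hc
        cases h : freqA.get? ch with
        | none => rw [h] at hc; simp at hc
        | some v => exact ⟨v, rfl⟩
      obtain ⟨v, hv⟩ := this
      have hv0 := IP ch v hv
      have hB : freqB.getD ch 0 = v := by rw [← hAB, PySem.Dict.getD_of_get?_eq_some _ _ hv]
      rw [if_pos hc, show (freqB.getD ch 0 == 0) = false by simp [hB, hv0]]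
      simpa using IS
    · have hnone : freqA.get? ch = none := by
        rw [PySem.Dict.contains_eq_isSome_get?] at hc
        cases h : freqA.get? ch with
        | none => rfl
        | some v => rw [h] at hc; simp at hc
      have hB : freqB.getD ch 0 = 0 := by
        rw [← hAB, PySem.Dict.getD_of_get?_eq_none _ _ hnone]
      rw [if_neg hc, show (freqB.getD ch 0 == 0) = true by simp [hB]]
      have := IS
      rw [if_pos rfl]
      push_cast
      omega
  · intro c
    rw [PySem.Dict.getD_insert, hcount c]
    by_cases hc : c = ch
    · rw [if_pos hc, if_pos hc, hc, IB ch]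
    · rw [if_neg hc, if_neg hc, IB c, add_zero]

-- inner-loop removal of the window head d: A may erase the key, B writes the decremented
-- count back (possibly 0) and adjusts 'distinct'
theorem pvShrinkStep_inv (d : Char) (w' : List Char) (freqA freqB : PySem.Dict Char Int)
    (distinct v : Int) (hInv : pvInv (d :: w') freqA freqB distinct)
    (hv : freqA.get? d = some v) :
    freqB.getD d 0 = v ∧
    pvInv w' (if (v - 1) == 0 then (freqA.insert d (v - 1)).erase d else freqA.insert d (v - 1))
      (freqB.insert d (v - 1))
      (if (v - 1) == 0 then distinct - 1 else distinct) := by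
  obtain ⟨IA, IP, IN, IS, IB⟩ := hInv
  have hvA : freqA.getD d 0 = v := PySem.Dict.getD_of_get?_eq_some _ _ hv
  have hvc : v = (((d :: w').count d : Nat) : Int) := by rw [← hvA, IA]
  have hcd : (d :: w').count d = w'.count d + 1 := by simp [List.count_cons_self]
  have hcne : ∀ c : Char, c ≠ d → (d :: w').count c = w'.count c := by
    intro c hc
    simp only [List.count_cons]
    rw [show (d == c) = false by simp; exact fun h => hc h.symm]
    simp
  have hcont : freqA.contains d = true := by
    rw [PySem.Dict.contains_eq_isSome_get?, hv]; rfl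
  have hBd : freqB.getD d 0 = v := by rw [IB, ← hvc]
  refine ⟨hBd, ?_⟩
  have hsizeI : (freqA.insert d (v - 1)).size = freqA.size := by
    rw [PySem.Dict.size_insert, if_pos hcont]
  by_cases he : v - 1 = 0
  · rw [show ((v - 1) == 0) = true by simp [he], if_pos rfl, if_pos rfl]
    refine ⟨?_, ?_, ?_, ?_, ?_⟩
    · intro c
      by_cases hc : c = d
      · subst hc
        rw [PySem.Dict.getD_of_get?_eq_none _ _ (pvGet?_erase_self _ _)]
        have := hcd
        omega
      · rw [PySem.Dict.getD_eq_get?_getD, pvGet?_erase_of_ne _ hc,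
          PySem.Dict.get?_insert, if_neg hc, ← PySem.Dict.getD_eq_get?_getD, IA c, hcne c hc]
    · intro c u
      by_cases hc : c = d
      · subst hc; rw [pvGet?_erase_self]; intro h; cases h
      · rw [pvGet?_erase_of_ne _ hc, PySem.Dict.get?_insert, if_neg hc]; exact IP c u
    · exact pvNodupKeys_erase _ _ (PySem.Dict.nodup_keys_insert _ _ _ IN)
    · have h1 := pvSize_erase (freqA.insert d (v - 1)) (PySem.Dict.get?_insert_self _ _ _)
        (PySem.Dict.nodup_keys_insert _ _ _ IN)
      rw [hsizeI] at h1
      have hsz : 1 ≤ freqA.size := by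
        by_contra hz
        have : freqA.size = 0 := by omega
        omega
      omega
    · intro c
      rw [PySem.Dict.getD_insert]
      by_cases hc : c = d
      · rw [if_pos hc, hc]
        have := hcd
        omega
      · rw [if_neg hc, IB c, hcne c hc]
  · rw [show ((v - 1) == 0) = false by simp [he], if_neg (by simp), if_neg (by simp)]
    refine ⟨?_, ?_, PySem.Dict.nodup_keys_insert _ _ _ IN, ?_, ?_⟩
    · intro c
      rw [PySem.Dict.getD_insert]
      by_cases hc : c = d
      · rw [if_pos hc, hc]
        have := hcd
        omega
      · rw [if_neg hc, IA c, hcne c hc]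
    · intro c u
      rw [PySem.Dict.get?_insert]
      by_cases hc : c = d
      · rw [if_pos hc]
        intro h
        have := (Option.some.inj h).symm
        omega
      · rw [if_neg hc]; exact IP c u
    · rw [hsizeI]; exact IS
    · intro c
      rw [PySem.Dict.getD_insert]
      by_cases hc : c = d
      · rw [if_pos hc, hc]
        have := hcd
        omega
      · rw [if_neg hc, IB c, hcne c hc]

-- the window head is s[l], and the tail is the window at l+1
theorem pvHead_prefix (cs : List Char) {l : Int} {d : Char} {w' : List Char}
    (h0 : 0 ≤ l) (hw : d :: w' <+: cs.drop l.toNat) :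
    PySem.List.pyGet? cs l = some d ∧ w' <+: cs.drop (l + 1).toNat := by
  obtain ⟨t, ht⟩ := hw
  have hlt : l.toNat < cs.length := by
    by_contra hge
    rw [List.drop_eq_nil_of_le (by omega)] at ht
    simp at ht
  have hget : cs[l.toNat] = d := by
    have := List.getElem_of_eq ht.symm (i := 0) (by simpa using hlt)
    simpa using this
  refine ⟨?_, ?_⟩
  · rw [PySem.List.pyGet?_eq_some_getElem cs h0 (by omega), hget]
  · have h1 : (l + 1).toNat = l.toNat + 1 := by omega
    have hdd : cs.drop (l.toNat + 1) = List.drop 1 (cs.drop l.toNat) := by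
      rw [List.drop_drop, Nat.add_comm]
    rw [h1, hdd, ← ht]
    exact ⟨t, rfl⟩

-- a nonempty dict under the invariant forces a nonempty window
theorem pvWindow_ne_nil {w : List Char} {freqA freqB : PySem.Dict Char Int} {distinct k : Int}
    (hInv : pvInv w freqA freqB distinct) (hk : 1 ≤ k) (hg : k ≤ (freqA.size : Int)) :
    ∃ d w', w = d :: w' := by
  obtain ⟨IA, IP, IN, _, _⟩ := hInv
  have hne : freqA.items ≠ [] := by
    intro hnil
    have : freqA.size = 0 := by simp [PySem.Dict.size, hnil]
    omega
  obtain ⟨p, hp⟩ := List.exists_mem_of_ne_nil _ hne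
  have hg? : freqA.get? p.1 = some p.2 := PySem.Dict.get?_of_mem_items _ hp IN
  have hnz := IP p.1 p.2 hg?
  have hgd : freqA.getD p.1 0 = p.2 := PySem.Dict.getD_of_get?_eq_some _ _ hg?
  have hcnt : ((w.count p.1 : Nat) : Int) = p.2 := by rw [← hgd, IA]
  cases w with
  | nil => simp at hcnt; omega
  | cons d w' => exact ⟨d, w', rfl⟩

-- A's inner loop and B's inner loop walk through related states; A's count grows by
-- (n - r) per removed position, B's left pointer moves the same number j of steps
theorem pvShrink_rel (cs : List Char) (n k r : Int) (hk : 1 ≤ k) :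
    ∀ (fuel : Nat) (w : List Char) (count aM l distinct : Int) (freqA freqB : PySem.Dict Char Int),
      0 ≤ l → w <+: cs.drop l.toNat → pvInv w freqA freqB distinct →
      ∃ (j : Nat) (FA : PySem.Dict Char Int),
        j ≤ w.length ∧
        (pvShrinkB cs (k-1) fuel ⟨aM, l, distinct, freqB⟩).left = l + j ∧
        pvShrinkA cs n k r fuel count l freqA = (count + (n - r) * j, l + j, FA) ∧
        (w.drop j) <+: cs.drop (l + j).toNat ∧
        pvInv (w.drop j) FA (pvShrinkB cs (k-1) fuel ⟨aM, l, distinct, freqB⟩).freq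
          (pvShrinkB cs (k-1) fuel ⟨aM, l, distinct, freqB⟩).distinct := by
  intro fuel
  induction fuel with
  | zero =>
    intro w count aM l distinct freqA freqB h0 hw hInv
    exact ⟨0, freqA, by simp [pvShrinkA, pvShrinkB, hw, hInv]⟩
  | succ fuel ih =>
    intro w count aM l distinct freqA freqB h0 hw hInv
    have IS := hInv.2.2.2.1
    by_cases hg : k ≤ (freqA.size : Int)
    · obtain ⟨d, w', rfl⟩ := pvWindow_ne_nil hInv hk hg
      obtain ⟨hgetl, hw'⟩ := pvHead_prefix cs h0 hw
      have hvsome : ∃ v, freqA.get? d = some v := by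
        cases h : freqA.get? d with
        | none =>
          have h1 := PySem.Dict.getD_of_get?_eq_none freqA (0 : Int) h
          have h2 := hInv.1 d
          simp [List.count_cons_self] at h2
          omega
        | some v => exact ⟨v, rfl⟩
      obtain ⟨v, hv⟩ := hvsome
      obtain ⟨hBd, hInv'⟩ := pvShrinkStep_inv d w' freqA freqB distinct v hInv hv
      rw [pvShrinkA, pvShrinkB, if_pos hg, if_neg (show ¬(distinct ≤ k - 1) by omega), hgetl]
      simp only [hv]
      obtain ⟨j, FA, hj, hB1, hA1, hwj, hInvj⟩ :=
        ih w' (count + (n - r)) aM (l + 1)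
          (if (freqB.getD d 0 - 1) == 0 then distinct - 1 else distinct)
          (if (v - 1) == 0 then (freqA.insert d (v - 1)).erase d else freqA.insert d (v - 1))
          (freqB.insert d (freqB.getD d 0 - 1))
          (by omega) hw' (by rw [hBd]; exact hInv')
      refine ⟨j + 1, FA, by simp; omega, ?_, ?_, ?_, ?_⟩
      · rw [hB1]; push_cast; ring
      · rw [hA1]; push_cast; ring_nf
      · rw [List.drop_succ_cons, show (l + (((j + 1 : Nat)) : Int)) = (l + 1) + j by push_cast; ring]
        exact hwj
      · rw [List.drop_succ_cons]
        exact hInvj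
    · rw [pvShrinkA, pvShrinkB, if_neg hg, if_pos (show distinct ≤ k - 1 by omega)]
      exact ⟨0, freqA, by simp [hw, hInv]⟩

-- main loop simulation: A's fold over range(n) vs B's recursion over the enumerate suffix;
-- 2·count = (n−m)(n−m+1) − 2·at_most + 2·m·l ties A's accumulator to B's
theorem pvLoop_rel (cs : List Char) (k : Int) (hk : 1 ≤ k) :
    ∀ (m : Nat) (w : List Char) (count atMost l distinct : Int) (freqA freqB : PySem.Dict Char Int),
      (m : Int) ≤ (cs.length : Int) → 0 ≤ l →
      w <+: cs.drop l.toNat → l + (w.length : Int) = (cs.length : Int) - m →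
      pvInv w freqA freqB distinct →
      2 * count = ((cs.length : Int) - m) * ((cs.length : Int) - m + 1) - 2 * atMost + 2 * m * l →
      2 * ((PySem.List.pyRange ((cs.length : Int) - m) (cs.length : Int)).foldl
            (pvStepA cs (cs.length : Int) k) (count, l, freqA)).1 =
        (cs.length : Int) * ((cs.length : Int) + 1) -
        2 * pvGoB cs (k - 1)
              (PySem.List.enumerate (cs.drop ((cs.length : Int) - m).toNat) ((cs.length : Int) - m))
              ⟨atMost, l, distinct, freqB⟩ := by
  intro m
  induction m with
  | zero =>
    intro w count atMost l distinct freqA freqB hm h0 hw hlen hInv hcnt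
    rw [PySem.List.pyRange_one_eq_nil (by omega)]
    rw [show ((cs.length : Int) - (0:Nat)).toNat = cs.length by omega, List.drop_length,
      PySem.List.enumerate_nil]
    simp only [List.foldl_nil, pvGoB]
    push_cast at hcnt
    linarith
  | succ m ih =>
    intro w count atMost l distinct freqA freqB hm h0 hw hlen hInv hcnt
    set n : Int := (cs.length : Int) with hn
    set r : Int := n - (m + 1 : Nat) with hrdef
    have hr0 : 0 ≤ r := by omega
    have hrn : r < n := by omega
    have hrnat : r.toNat < cs.length := by omega
    have hget : PySem.List.pyGet? cs r = some cs[r.toNat] :=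
      PySem.List.pyGet?_eq_some_getElem cs hr0 hrn
    set c : Char := cs[r.toNat] with hc
    -- A side: first element of the range
    rw [PySem.List.pyRange_one_cons hrn, List.foldl_cons]
    -- B side: first element of the enumerate suffix
    rw [show cs.drop r.toNat = c :: cs.drop (r.toNat + 1) from List.drop_eq_getElem_cons hrnat,
      PySem.List.enumerate_cons]
    -- window extension by c = cs[r]
    have hlw : l.toNat + w.length = r.toNat := by omega
    have hw1 : w ++ [c] <+: cs.drop l.toNat := by
      rw [List.prefix_iff_eq_take, List.length_append, List.length_singleton, List.take_add_one,
        ← List.prefix_iff_eq_take.mp hw]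
      rw [List.getElem?_drop, hlw, List.getElem?_eq_getElem hrnat]
      rfl
    have hInv1 := pvInsert_inv w c freqA freqB distinct hInv
    obtain ⟨j, FA, hj, hB1, hA1, hwj, hInvj⟩ :=
      pvShrink_rel cs n k r hk (cs.length + 1) (w ++ [c]) count atMost l
        (if freqB.getD c 0 == 0 then distinct + 1 else distinct)
        (freqA.insert c (freqA.getD c 0 + 1))
        (freqB.insert c (freqB.getD c 0 + 1)) h0 hw1 hInv1
    -- one step of A and of B
    rw [show pvStepA cs n k (count, l, freqA) r =
        pvShrinkA cs n k r (cs.length + 1) count l (freqA.insert c (freqA.getD c 0 + 1)) from by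
      simp only [pvStepA, hget]]
    rw [hA1]
    simp only [pvGoB]
    set stB := pvShrinkB cs (k - 1) (cs.length + 1)
      ⟨atMost, l, (if freqB.getD c 0 == 0 then distinct + 1 else distinct),
        freqB.insert c (freqB.getD c 0 + 1)⟩ with hstB
    rw [show ({ stB with atMost := atMost + (r - stB.left + 1) } : PvBSt) =
        ⟨atMost + (r - (l + j) + 1), l + j, stB.distinct, stB.freq⟩ from by
      rw [hB1]]
    have hstep := ih ((w ++ [c]).drop j) (count + (n - r) * j) (atMost + (r - (l + j) + 1))
      (l + j) stB.distinct FA stB.freq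
      (by omega) (by omega) hwj
      (by
        rw [List.length_drop, List.length_append, List.length_singleton]
        rw [List.length_append, List.length_singleton] at hj
        omega)
      hInvj
      (by rw [hrdef] at hcnt ⊢; push_cast at hcnt ⊢; linear_combination hcnt)
    rw [show n - (m : Nat) = r + 1 from by omega] at hstep
    rw [show (r + 1).toNat = r.toNat + 1 from by omega] at hstep
    exact hstep

-- ===== VERDICT =====
theorem at_least_k_unique_spec : Claim_equal_at_least_k_unique := by
  intro s k _ hpre
  unfold Spec_at_least_k_unique at_least_k_unique at_least_k_unique_alt
  by_cases hk0 : k = 0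
  · simp [hk0]
  · by_cases hkneg : k ≤ 0
    · -- k < 0: Pre_ forces s empty
      have hnil : s.toList = [] := by
        rcases hpre with h | h
        · omega
        · exact h
      rw [if_neg hk0, if_pos hkneg]
      simp [hnil, PySem.List.pyRange_one_eq_nil (le_refl (0 : Int)), PySem.Int.floordiv]
    · -- k ≥ 1
      rw [if_neg hk0, if_neg hkneg]
      have h := pvLoop_rel s.toList k (by omega) s.toList.length [] 0 0 0 0
        PySem.Dict.empty PySem.Dict.empty (by simp) le_rfl (by simp) (by simp)
        (by
          refine ⟨fun c => by simp [PySem.Dict.getD_empty],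
            fun c v hv => by simp [PySem.Dict.get?_empty] at hv,
            PySem.Dict.nodup_keys_empty, by simp [PySem.Dict.size_empty],
            fun c => by simp [PySem.Dict.getD_empty]⟩)
        (by push_cast; ring)
      rw [show ((s.toList.length : Int) - (s.toList.length : Nat)) = 0 from by ring] at h
      simp only [Int.toNat_zero, List.drop_zero] at h
      set n : Int := (s.toList.length : Int) with hn
      set cA := ((PySem.List.pyRange 0 n).foldl (pvStepA s.toList n k) (0, 0, PySem.Dict.empty)).1
      set cB := pvGoB s.toList (k - 1) (PySem.List.enumerate s.toList) ⟨0, 0, 0, PySem.Dict.empty⟩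
      have hfd : PySem.Int.floordiv (n * (n + 1)) 2 = n * (n + 1) / 2 :=
        PySem.Int.floordiv_eq_ediv_of_pos (by omega)
      have heven : n * (n + 1) = 2 * (cA + cB) := by linarith
      rw [hfd, heven, Int.mul_ediv_cancel_left _ (by norm_num : (2:Int) ≠ 0)]
      ring
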